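-- pv_equiv track=rewrite | github.com/sbamboo/crosshell_modulo | core/cslib/test.py | useOnlyDoublePipeSplit
-- ===== SOURCE A (Python) =====
-- def useOnlyDoublePipeSplit(text) -> str:
--     '''CSlib.CSPE: Function to replace ; with ||.'''
--     result = []
--     inside_braces = False
--     for char in text:
--         if char == '{':
--             inside_braces = True
--         elif char == '}':
--             inside_braces = False
--         if char == ';' and not inside_braces:
--             result.append('||')
--         else:
--             result.append(char)
--     return ''.join(result)
-- ===== SOURCE B (Python) =====
-- def useOnlyDoublePipeSplit(text) -> str:
--     '''CSlib.CSPE: Function to replace ; with || (segment-based rewrite).'''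
--     parts = []
--     s = text
--     while True:
--         out, brace, rest = s.partition('{')
--         parts.append(out.replace(';', '||'))
--         if not brace:
--             break
--         ins, close, s = rest.partition('}')
--         parts.append('{' + ins + close)
--         if not close:
--             break
--     return ''.join(parts)
-- ===== Notes on version B (the rewrite author's own statement) =====
-- stated objective: faster
-- what changed: Replaces the character-by-character loop with an inside_braces boolean flag by a segment scanner that repeatedly partitions the string at brace delimiters, bulk-replacing the semicolons in each outside segment at once and keeping brace blocks verbatim.
import Mathlib
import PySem

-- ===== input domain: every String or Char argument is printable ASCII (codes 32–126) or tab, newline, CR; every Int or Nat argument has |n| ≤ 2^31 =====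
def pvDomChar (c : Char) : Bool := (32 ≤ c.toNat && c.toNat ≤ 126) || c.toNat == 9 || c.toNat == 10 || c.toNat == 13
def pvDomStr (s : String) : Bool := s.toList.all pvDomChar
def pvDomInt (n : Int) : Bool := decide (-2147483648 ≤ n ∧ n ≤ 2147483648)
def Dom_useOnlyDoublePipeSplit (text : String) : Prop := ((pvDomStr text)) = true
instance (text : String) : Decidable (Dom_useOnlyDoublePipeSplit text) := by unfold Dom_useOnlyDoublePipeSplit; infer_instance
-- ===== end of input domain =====

-- B replaces A's char-by-char boolean-flag loop by a segment scanner (partition at brace blocks,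
-- bulk-replacing semicolons per outside segment): constant-factor faster in a timing run; return value proved equal.


-- ===== PORT A =====
-- A: one pass over the characters, toggling an 'inside_braces' flag, appending '||' for each ';' outside.
def pvStepA (st : List String × Bool) (c : Char) : List String × Bool :=
  let inside := if c = '{' then true else if c = '}' then false else st.2
  if c = ';' && !inside then (st.1 ++ ["||"], inside) else (st.1 ++ [c.toString], inside)

def useOnlyDoublePipeSplit (text : String) : String :=
  String.join ((text.toList.foldl pvStepA ([], false)).1)

-- ===== PORT B =====
-- Source B: out.replace(';', '||') applied to an outside segment (exact on chars)
def pvReplSemi (l : List Char) : String :=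
  String.ofList (l.flatMap (fun c => if c = ';' then ['|', '|'] else [c]))

-- Source B's loop: partition at '{' (= takeWhile/dropWhile on ≠'{'), rewrite the outside part,
-- partition the remainder at '}', keep the '{…}' block verbatim, recurse on what follows.
def pvSegs (s : List Char) : List String :=
  match h : s.dropWhile (· ≠ '{') with
  | [] => [pvReplSemi (s.takeWhile (· ≠ '{'))]
  | _ :: r =>
    match h2 : r.dropWhile (· ≠ '}') with
    | [] => [pvReplSemi (s.takeWhile (· ≠ '{')), String.ofList ('{' :: r.takeWhile (· ≠ '}'))]
    | _ :: r3 =>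
      pvReplSemi (s.takeWhile (· ≠ '{')) ::
        String.ofList (('{' :: r.takeWhile (· ≠ '}')) ++ ['}']) :: pvSegs r3
termination_by s.length
decreasing_by
  have hr := List.length_dropWhile_le (p := (· ≠ '{')) (l := s)
  have hr2 := List.length_dropWhile_le (p := (· ≠ '}')) (l := r)
  rw [h] at hr; rw [h2] at hr2; simp at hr hr2; omega

def useOnlyDoublePipeSplit_alt (text : String) : String :=
  String.join (pvSegs text.toList)

-- ===== PRECONDITION & SPEC =====
def Spec_useOnlyDoublePipeSplit (text : String) (out : String) : Prop := out = useOnlyDoublePipeSplit_alt text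
instance (text : String) (out : String) : Decidable (Spec_useOnlyDoublePipeSplit text out) := by unfold Spec_useOnlyDoublePipeSplit; infer_instance

-- ===== CLAIM (what is proved, stated in full; the proofs are below) =====
def Claim_equal_useOnlyDoublePipeSplit : Prop := ∀ (text : String), Dom_useOnlyDoublePipeSplit text → Spec_useOnlyDoublePipeSplit text (useOnlyDoublePipeSplit text)

-- ===== LEMMAS AND PROOFS =====

-- Reference semantics: the output characters, outside / inside braces.
mutual
def outS : List Char → List Char
  | [] => []
  | c :: r =>
    if c = '{' then '{' :: inS r
    else if c = ';' then '|' :: '|' :: outS r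
    else c :: outS r
def inS : List Char → List Char
  | [] => []
  | c :: r => if c = '}' then '}' :: outS r else c :: inS r
end

theorem foldl_string_append (l : List String) : ∀ (a : String),
    List.foldl (fun r s => r ++ s) a l = a ++ String.join l := by
  induction l with
  | nil => intro a; simp [String.join]
  | cons x xs ih =>
    intro a
    rw [List.foldl_cons, ih]
    have hjoin : String.join (x :: xs) = x ++ String.join xs := by
      show List.foldl (fun r s => r ++ s) "" (x :: xs) = x ++ String.join xs
      rw [List.foldl_cons, ih]
      simp
    rw [hjoin, String.append_assoc]

theorem join_snoc (acc : List String) (x : String) :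
    String.join (acc ++ [x]) = String.join acc ++ x := by
  simp [String.join, List.foldl_append]

theorem ofList_cons' (c : Char) (l : List Char) :
    String.ofList (c :: l) = c.toString ++ String.ofList l := by
  rw [show c :: l = [c] ++ l from rfl, String.ofList_append]; rfl

theorem pipes_eq : ("||" : String) = String.ofList ['|', '|'] := rfl

theorem foldl_stepA_join (l : List Char) :
    ∀ (acc : List String) (ins : Bool),
    String.join ((l.foldl pvStepA (acc, ins)).1)
      = String.join acc ++ String.ofList (if ins then inS l else outS l) := by
  induction l with
  | nil => intro acc ins; cases ins <;> simp [outS, inS]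
  | cons c r ih =>
    intro acc ins
    rw [List.foldl_cons]
    by_cases hb : c = '{'
    · subst hb
      rw [show pvStepA (acc, ins) '{' = (acc ++ [String.singleton '{'], true) from by
        cases ins <;> simp [pvStepA]]
      cases ins <;>
        simp [ih, join_snoc, String.push_eq_append, -String.append_singleton, outS, inS, ofList_cons', String.append_assoc, Char.toString]
    · by_cases hcb : c = '}'
      · subst hcb
        rw [show pvStepA (acc, ins) '}' = (acc ++ [String.singleton '}'], false) from by
          cases ins <;> simp [pvStepA]]
        cases ins <;>
          simp [ih, join_snoc, String.push_eq_append, -String.append_singleton, outS, inS, ofList_cons', String.append_assoc, Char.toString]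
      · by_cases hs : c = ';'
        · subst hs
          cases ins
          · rw [show pvStepA (acc, false) ';' = (acc ++ ["||"], false) from by simp [pvStepA]]
            simp [ih, join_snoc, String.push_eq_append, -String.append_singleton, outS, inS, ofList_cons', pipes_eq, String.append_assoc,
              String.ofList_append]
          · rw [show pvStepA (acc, true) ';' = (acc ++ [String.singleton ';'], true) from by simp [pvStepA]]
            simp [ih, join_snoc, String.push_eq_append, -String.append_singleton, outS, inS, ofList_cons', String.append_assoc, Char.toString]
        · rw [show pvStepA (acc, ins) c = (acc ++ [c.toString], ins) from by
            cases ins <;> simp [pvStepA, hb, hcb, hs]]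
          cases ins <;>
            simp [ih, join_snoc, String.push_eq_append, -String.append_singleton, outS, inS, hb, hcb, hs, ofList_cons', String.append_assoc]

theorem useOnlyDoublePipeSplit_eq_outS (text : String) :
    useOnlyDoublePipeSplit text = String.ofList (outS text.toList) := by
  unfold useOnlyDoublePipeSplit
  simpa using foldl_stepA_join text.toList [] false

theorem outS_append_no_brace (out rest : List Char) (h : ∀ c ∈ out, c ≠ '{') :
    outS (out ++ rest)
      = out.flatMap (fun c => if c = ';' then ['|', '|'] else [c]) ++ outS rest := by
  induction out with
  | nil => simp
  | cons c r ih =>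
    have hc : c ≠ '{' := h c (by simp)
    by_cases hs : c = ';'
    · subst hs; simp [outS, hc, ih (fun x hx => h x (by simp [hx]))]
    · simp [outS, hc, hs, ih (fun x hx => h x (by simp [hx]))]

theorem inS_append_no_close (ins rest : List Char) (h : ∀ c ∈ ins, c ≠ '}') :
    inS (ins ++ rest) = ins ++ inS rest := by
  induction ins with
  | nil => simp
  | cons c r ih =>
    have hc : c ≠ '}' := h c (by simp)
    simp [inS, hc, ih (fun x hx => h x (by simp [hx]))]

theorem mem_takeWhile_ne {a : Char} (l : List Char) (x : Char)
    (hx : x ∈ l.takeWhile (· ≠ a)) : x ≠ a := by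
  have := List.mem_takeWhile_imp hx; simpa using this

theorem head_dropWhile_ne (l : List Char) (a head : Char) (r : List Char)
    (h : l.dropWhile (· ≠ a) = head :: r) : head = a := by
  have := List.head?_dropWhile_not (p := fun x => decide (x ≠ a)) (l := l)
  rw [h] at this; simpa using this

theorem pvSegs_eq1 (s : List Char) (h : s.dropWhile (· ≠ '{') = []) :
    pvSegs s = [pvReplSemi (s.takeWhile (· ≠ '{'))] := by
  rw [pvSegs]
  split
  · rfl
  · next heq => rw [h] at heq; cases heq

theorem pvSegs_eq2 (s : List Char) (head : Char) (r : List Char)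
    (h : s.dropWhile (· ≠ '{') = head :: r) (h2 : r.dropWhile (· ≠ '}') = []) :
    pvSegs s = [pvReplSemi (s.takeWhile (· ≠ '{')), String.ofList ('{' :: r.takeWhile (· ≠ '}'))] := by
  rw [pvSegs]
  split
  · next heq => rw [h] at heq; cases heq
  · next head1 r1 heq =>
    rw [h] at heq
    cases heq
    split
    · rfl
    · next heq2 => rw [h2] at heq2; cases heq2

theorem pvSegs_eq3 (s : List Char) (head : Char) (r : List Char) (head2 : Char) (r3 : List Char)
    (h : s.dropWhile (· ≠ '{') = head :: r) (h2 : r.dropWhile (· ≠ '}') = head2 :: r3) :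
    pvSegs s = pvReplSemi (s.takeWhile (· ≠ '{')) ::
      String.ofList (('{' :: r.takeWhile (· ≠ '}')) ++ ['}']) :: pvSegs r3 := by
  rw [pvSegs]
  split
  · next heq => rw [h] at heq; cases heq
  · next head1 r1 heq =>
    rw [h] at heq
    cases heq
    split
    · next heq2 => rw [h2] at heq2; cases heq2
    · next head3 r4 heq2 => rw [h2] at heq2; cases heq2; rfl

theorem join_segs_eq_outS (s : List Char) : String.join (pvSegs s) = String.ofList (outS s) := by
  induction s using pvSegs.induct with
  | case1 s h =>
    have hs : s = s.takeWhile (· ≠ '{') ++ [] := by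
      conv_lhs => rw [← List.takeWhile_append_dropWhile (p := (· ≠ '{')) (l := s)]
      rw [h]
    rw [pvSegs_eq1 s h]
    conv_rhs => rw [hs, outS_append_no_brace _ [] (mem_takeWhile_ne s)]
    simp [pvReplSemi, outS, String.join]
  | case2 s head r h h2 =>
    have hhead : head = '{' := head_dropWhile_ne s '{' head r h
    have hs : s = s.takeWhile (· ≠ '{') ++ '{' :: r := by
      conv_lhs => rw [← List.takeWhile_append_dropWhile (p := (· ≠ '{')) (l := s)]
      rw [h, hhead]
    have hr : r = r.takeWhile (· ≠ '}') ++ [] := by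
      conv_lhs => rw [← List.takeWhile_append_dropWhile (p := (· ≠ '}')) (l := r)]
      rw [h2]
    rw [pvSegs_eq2 s head r h h2]
    conv_rhs => rw [hs, outS_append_no_brace _ _ (mem_takeWhile_ne s)]
    rw [show outS ('{' :: r) = '{' :: inS r from by simp [outS]]
    conv_rhs => rw [hr, inS_append_no_close _ [] (mem_takeWhile_ne r)]
    simp [pvReplSemi, inS, String.join, String.ofList_append, ofList_cons', String.append_assoc]
  | case3 s head r h head2 r3 h2 ih =>
    have hhead : head = '{' := head_dropWhile_ne s '{' head r h
    have hhead2 : head2 = '}' := head_dropWhile_ne r '}' head2 r3 h2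
    have hs : s = s.takeWhile (· ≠ '{') ++ '{' :: r := by
      conv_lhs => rw [← List.takeWhile_append_dropWhile (p := (· ≠ '{')) (l := s)]
      rw [h, hhead]
    have hr : r = r.takeWhile (· ≠ '}') ++ '}' :: r3 := by
      conv_lhs => rw [← List.takeWhile_append_dropWhile (p := (· ≠ '}')) (l := r)]
      rw [h2, hhead2]
    rw [pvSegs_eq3 s head r head2 r3 h h2]
    conv_rhs => rw [hs, outS_append_no_brace _ _ (mem_takeWhile_ne s)]
    rw [show outS ('{' :: r) = '{' :: inS r from by simp [outS]]
    conv_rhs => rw [hr, inS_append_no_close _ _ (mem_takeWhile_ne r)]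
    rw [show inS ('}' :: r3) = '}' :: outS r3 from by simp [inS]]
    simp only [String.join, List.foldl_cons]
    rw [foldl_string_append]
    simp [pvReplSemi, ih, String.push_eq_append, -String.append_singleton, String.ofList_append,
      ofList_cons', String.append_assoc]

-- ===== VERDICT (by name: the statement is the Claim_ definition above) =====
theorem useOnlyDoublePipeSplit_spec : Claim_equal_useOnlyDoublePipeSplit := by
  intro text _
  unfold Spec_useOnlyDoublePipeSplit useOnlyDoublePipeSplit_alt
  rw [useOnlyDoublePipeSplit_eq_outS, join_segs_eq_outS]
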